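-- pv_equiv track=rewrite | github.com/blessleydylan/CP125-Class-Repo-2 | labs/lab06/exercise1/exercise1.py | get_legit_power_users
-- ===== SOURCE A (Python) =====
-- def filter_bots(bot_ids):
--     """
--     Returns a set of bot user IDs for fast membership checks.
--     """
--     return set(bot_ids)
--
-- def get_legit_power_users(log_data, bot_ids, threshold):
--     # Prepare bot lookup
--     bots = filter_bots(bot_ids)
--
--     # Dictionary to store unique actions per user
--     user_actions = {}
--
--     for timestamp, user_id, action_type in log_data:
--         # Skip bot users
--         if user_id in bots:
--             continue
--
--         # Track unique actions
--         if user_id not in user_actions: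
--             user_actions[user_id] = set()
--         user_actions[user_id].add(action_type)
--
--     # Identify power users
--     power_users = [
--         user_id
--         for user_id, actions in user_actions.items()
--         if len(actions) > threshold
--     ]
--
--     # Return sorted list
--     return sorted(power_users)
-- ===== SOURCE B (Python) =====
-- def get_legit_power_users(log_data, bot_ids, threshold):
--     bots = set(bot_ids)
--
--     # Candidate users in ascending order (bots dropped up front)
--     users = sorted({u for _t, u, _a in log_data if u not in bots})
--
--     # For each candidate, rescan the log for its distinct actions;
--     # the output is built in sorted order, so no final sort is needed.
--     out = []
--     for u in users:
--         actions = {a for _t, v, a in log_data if v == u}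
--         if len(actions) > threshold:
--             out.append(u)
--     return out
-- ===== Notes on version B (the rewrite author's own statement) =====
-- stated objective: alternative
-- what changed: Drops A's single-pass per-user dict of action sets: B first sorts the distinct non-bot user ids, then for each candidate rescans the whole log to collect its distinct actions (nested scans), appending qualifying users so the result is built already in order with no final sort.
import Mathlib
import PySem

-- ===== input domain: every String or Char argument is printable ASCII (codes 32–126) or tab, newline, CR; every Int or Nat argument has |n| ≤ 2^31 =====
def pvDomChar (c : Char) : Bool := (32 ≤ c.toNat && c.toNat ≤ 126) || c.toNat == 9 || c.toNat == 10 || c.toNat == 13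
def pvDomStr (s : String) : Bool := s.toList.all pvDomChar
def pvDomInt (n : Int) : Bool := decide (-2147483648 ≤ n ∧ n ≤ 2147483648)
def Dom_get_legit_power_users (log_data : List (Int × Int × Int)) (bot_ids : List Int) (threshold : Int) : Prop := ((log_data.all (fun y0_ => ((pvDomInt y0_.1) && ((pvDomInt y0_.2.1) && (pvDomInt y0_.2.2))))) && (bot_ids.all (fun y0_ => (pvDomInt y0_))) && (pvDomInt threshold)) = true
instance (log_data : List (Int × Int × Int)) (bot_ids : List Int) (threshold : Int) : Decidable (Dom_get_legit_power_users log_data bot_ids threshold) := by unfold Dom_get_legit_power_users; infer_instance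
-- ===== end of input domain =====

-- B replaces A's single-pass per-user dict of action sets with a sorted candidate list and a
-- per-user rescan of the log, building the output already in order (objective: alternative; slower on large logs).

-- ===== PORT A =====
def filter_bots (bot_ids : List Int) : PySem.Set Int := PySem.Set.ofList bot_ids

def get_legit_power_users (log_data : List (Int × Int × Int)) (bot_ids : List Int) (threshold : Int) : List Int :=
  let bots := filter_bots bot_ids
  let user_actions : PySem.Dict Int (PySem.Set Int) :=
    log_data.foldl (fun d e =>
      if PySem.Set.contains bots e.2.1 then d
      else
        let d := if d.contains e.2.1 then d else d.insert e.2.1 PySem.Set.empty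
        d.modify e.2.1 PySem.Set.empty (fun s => PySem.Set.add s e.2.2)) PySem.Dict.empty
  let power_users :=
    (user_actions.items.filter (fun p => decide (threshold < PySem.Set.len p.2))).map (·.1)
  PySem.List.sorted power_users (fun x => x) false

-- ===== PORT B =====
def get_legit_power_users_alt (log_data : List (Int × Int × Int)) (bot_ids : List Int) (threshold : Int) : List Int :=
  let bots := PySem.Set.ofList bot_ids
  let users : List Int :=
    PySem.List.sorted
      (PySem.Set.ofList
        ((log_data.filter (fun e => !PySem.Set.contains bots e.2.1)).map (·.2.1)))
      (fun x => x) false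
  users.foldl (fun out u =>
    let actions := PySem.Set.ofList ((log_data.filter (fun e => e.2.1 == u)).map (·.2.2))
    if threshold < PySem.Set.len actions then out ++ [u] else out) []

-- ===== PRECONDITION & SPEC =====
def Spec_get_legit_power_users (log_data : List (Int × Int × Int)) (bot_ids : List Int) (threshold : Int) (out : List Int) : Prop := out = get_legit_power_users_alt log_data bot_ids threshold
instance (log_data : List (Int × Int × Int)) (bot_ids : List Int) (threshold : Int) (out : List Int) : Decidable (Spec_get_legit_power_users log_data bot_ids threshold out) := by unfold Spec_get_legit_power_users; infer_instance

-- ===== CLAIM (what is proved, stated in full; the proofs are below) =====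
def Claim_equal_get_legit_power_users : Prop := ∀ (log_data : List (Int × Int × Int)) (bot_ids : List Int) (threshold : Int), Dom_get_legit_power_users log_data bot_ids threshold → Spec_get_legit_power_users log_data bot_ids threshold (get_legit_power_users log_data bot_ids threshold)

-- ===== LEMMAS AND PROOFS =====

def stepA (bots : PySem.Set Int) (d : PySem.Dict Int (PySem.Set Int)) (e : Int × Int × Int) :
    PySem.Dict Int (PySem.Set Int) :=
  if PySem.Set.contains bots e.2.1 then d
  else
    (if d.contains e.2.1 then d else d.insert e.2.1 PySem.Set.empty).modify e.2.1
      PySem.Set.empty (fun s => PySem.Set.add s e.2.2)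

lemma stepA_getD (bots : PySem.Set Int) (d : PySem.Dict Int (PySem.Set Int))
    (e : Int × Int × Int) (u : Int) :
    (stepA bots d e).getD u PySem.Set.empty =
      if e.2.1 ∈ bots then d.getD u PySem.Set.empty
      else if u = e.2.1 then PySem.Set.add (d.getD u PySem.Set.empty) e.2.2
      else d.getD u PySem.Set.empty := by
  by_cases hb : e.2.1 ∈ bots
  · simp [stepA, hb]
  · by_cases he : u = e.2.1
    · subst he
      by_cases hc : d.contains e.2.1 = true
      · simp [stepA, hb, hc]
      · simp only [Bool.not_eq_true] at hc
        simp [stepA, hb, hc,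
          PySem.Dict.getD_of_not_contains d _ hc,
          PySem.Dict.getD_insert_self]
    · by_cases hc : d.contains e.2.1 = true
      · simp [stepA, hb, hc, PySem.Dict.getD_modify, he]
      · simp only [Bool.not_eq_true] at hc
        simp [stepA, hb, hc, PySem.Dict.getD_modify, he,
          PySem.Dict.getD_insert_of_ne _ _ _ he]

lemma stepA_mem_keys (bots : PySem.Set Int) (d : PySem.Dict Int (PySem.Set Int))
    (e : Int × Int × Int) (u : Int) :
    u ∈ (stepA bots d e).keys ↔
      u ∈ d.keys ∨ (e.2.1 ∉ bots ∧ u = e.2.1) := by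
  by_cases hb : e.2.1 ∈ bots
  · simp [stepA, hb]
  · by_cases hc : d.contains e.2.1 = true
    · simp [stepA, hb, hc, PySem.Dict.keys_modify, PySem.Dict.mem_keys_insert]
      tauto
    · simp only [Bool.not_eq_true] at hc
      simp [stepA, hb, hc, PySem.Dict.keys_modify, PySem.Dict.mem_keys_insert]
      tauto

lemma stepA_nodup (bots : PySem.Set Int) (d : PySem.Dict Int (PySem.Set Int))
    (e : Int × Int × Int) (h : d.keys.Nodup) : (stepA bots d e).keys.Nodup := by
  unfold stepA
  by_cases hb : PySem.Set.contains bots e.2.1 = true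
  · rw [if_pos hb]; exact h
  · rw [if_neg hb, PySem.Dict.keys_modify]
    by_cases hc : d.contains e.2.1 = true
    · rw [if_pos hc]
      exact PySem.Dict.nodup_keys_insert _ _ _ h
    · rw [if_neg hc]
      exact PySem.Dict.nodup_keys_insert _ _ _ (PySem.Dict.nodup_keys_insert _ _ _ h)

lemma foldA_getD (bots : PySem.Set Int) (l : List (Int × Int × Int))
    (d : PySem.Dict Int (PySem.Set Int)) (u : Int) :
    (l.foldl (stepA bots) d).getD u PySem.Set.empty =
      if u ∈ bots then d.getD u PySem.Set.empty
      else PySem.Set.update (d.getD u PySem.Set.empty)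
        ((l.filter (fun e => e.2.1 == u)).map (·.2.2)) := by
  induction l generalizing d with
  | nil => by_cases hb : u ∈ bots <;> simp [hb, PySem.Set.update]
  | cons e l ih =>
    rw [List.foldl_cons, ih, stepA_getD]
    by_cases hb : u ∈ bots
    · by_cases hbe : e.2.1 ∈ bots
      · simp [hb, hbe]
      · have hne : ¬ u = e.2.1 := by rintro rfl; exact hbe hb
        simp [hb, hbe, hne]
    · by_cases he : e.2.1 = u
      · have hbe : e.2.1 ∉ bots := by rw [he]; exact hb
        simp [hb, he, PySem.Set.update]
      · have hne : ¬ u = e.2.1 := fun h => he h.symm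
        simp [hb, he, hne]

lemma foldA_mem_keys (bots : PySem.Set Int) (l : List (Int × Int × Int))
    (d : PySem.Dict Int (PySem.Set Int)) (u : Int) :
    u ∈ (l.foldl (stepA bots) d).keys ↔
      u ∈ d.keys ∨ (u ∉ bots ∧ ∃ e ∈ l, e.2.1 = u) := by
  induction l generalizing d with
  | nil => simp
  | cons e l ih =>
    rw [List.foldl_cons, ih, stepA_mem_keys]
    constructor
    · rintro ((hd | ⟨hbe, hre⟩) | ⟨hbu, e', he', hu⟩)
      · exact Or.inl hd
      · exact Or.inr ⟨by rw [← hre] at hbe; exact hbe, e, List.mem_cons_self, hre.symm⟩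
      · exact Or.inr ⟨hbu, e', List.mem_cons_of_mem _ he', hu⟩
    · rintro (hd | ⟨hbu, e', he', hu⟩)
      · exact Or.inl (Or.inl hd)
      · rcases List.mem_cons.mp he' with rfl | hm
        · exact Or.inl (Or.inr ⟨by rw [← hu] at hbu; exact hbu, hu.symm⟩)
        · exact Or.inr ⟨hbu, e', hm, hu⟩

lemma foldA_nodup (bots : PySem.Set Int) (l : List (Int × Int × Int))
    (d : PySem.Dict Int (PySem.Set Int)) (h : d.keys.Nodup) :
    (l.foldl (stepA bots) d).keys.Nodup := by
  induction l generalizing d with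
  | nil => exact h
  | cons e l ih => exact ih _ (stepA_nodup _ _ _ h)

-- B's accumulator loop is a filter over the sorted candidate list
lemma foldB_eq_filter (log_data : List (Int × Int × Int)) (threshold : Int)
    (users : List Int) (acc : List Int) :
    users.foldl (fun out u =>
      let actions := PySem.Set.ofList ((log_data.filter (fun e => e.2.1 == u)).map (·.2.2))
      if threshold < PySem.Set.len actions then out ++ [u] else out) acc
    = acc ++ users.filter (fun u =>
        decide (threshold <
          PySem.Set.len
            (PySem.Set.ofList ((log_data.filter (fun e => e.2.1 == u)).map (·.2.2))))) := by
  induction users generalizing acc with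
  | nil => simp
  | cons u us ih =>
    rw [List.foldl_cons, List.filter_cons]
    show List.foldl _ (if threshold <
        PySem.Set.len (PySem.Set.ofList ((log_data.filter (fun e => e.2.1 == u)).map (·.2.2)))
      then acc ++ [u] else acc) us = _
    rw [ih]
    by_cases h : threshold <
        PySem.Set.len (PySem.Set.ofList ((log_data.filter (fun e => e.2.1 == u)).map (·.2.2)))
    · rw [if_pos h, if_pos (by exact decide_eq_true h)]
      simp
    · rw [if_neg h, if_neg (by simpa using h)]

-- ===== VERDICT (by name: the statement is the Claim_ definition above) =====
theorem get_legit_power_users_spec : Claim_equal_get_legit_power_users := by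
  intro log bot th _
  unfold Spec_get_legit_power_users
  show PySem.List.sorted
      (((log.foldl (stepA (PySem.Set.ofList bot)) PySem.Dict.empty).items.filter
        (fun p => decide (th < PySem.Set.len p.2))).map (·.1)) (fun x => x) false
    = (PySem.List.sorted
        (PySem.Set.ofList
          ((log.filter (fun e => !PySem.Set.contains (PySem.Set.ofList bot) e.2.1)).map (·.2.1)))
        (fun x => x) false).foldl (fun out u =>
          let actions := PySem.Set.ofList ((log.filter (fun e => e.2.1 == u)).map (·.2.2))
          if th < PySem.Set.len actions then out ++ [u] else out) []
  set bots := PySem.Set.ofList bot with hbots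
  set dA := log.foldl (stepA bots) PySem.Dict.empty with hdA
  set U : List Int := PySem.Set.ofList
    ((log.filter (fun e => !PySem.Set.contains bots e.2.1)).map (·.2.1)) with hU
  rw [foldB_eq_filter, List.nil_append]
  have hnodA : dA.keys.Nodup := foldA_nodup _ _ _ PySem.Dict.nodup_keys_empty
  have eA : (dA.items.filter (fun p => decide (th < PySem.Set.len p.2))).map (·.1)
      = dA.keys.filter (fun u => decide (th < PySem.Set.len (dA.getD u PySem.Set.empty))) := by
    rw [PySem.Dict.items_eq_map_keys dA hnodA PySem.Set.empty, List.filter_map, List.map_map]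
    simp only [Function.comp_def, List.map_id']
  rw [eA]
  -- the RHS is strictly increasing
  have hpair : ((PySem.List.sorted U (fun x => x) false).filter (fun u =>
      decide (th <
        PySem.Set.len
          (PySem.Set.ofList ((log.filter (fun e => e.2.1 == u)).map (·.2.2)))))).Pairwise (· < ·) := by
    have := PySem.List.sorted_ofList_pairwise_lt
      (xs := (log.filter (fun e => !PySem.Set.contains bots e.2.1)).map (·.2.1))
    exact List.Pairwise.filter _ this
  -- and a permutation of the LHS's argument
  have hgd : ∀ u : Int, u ∉ bots →
      dA.getD u PySem.Set.empty =
        PySem.Set.ofList ((log.filter (fun e => e.2.1 == u)).map (·.2.2)) := by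
    intro u hu
    rw [hdA, foldA_getD, if_neg hu, PySem.Dict.getD_empty]
    rfl
  have hmemU : ∀ u : Int, u ∈ U ↔ u ∉ bots ∧ ∃ e ∈ log, e.2.1 = u := by
    intro u
    simp only [hU, PySem.Set.mem_ofList, List.mem_map, List.mem_filter, Bool.not_eq_true',
      PySem.Set.contains_eq_decide, decide_eq_false_iff_not]
    constructor
    · rintro ⟨e, ⟨he, hnb⟩, rfl⟩
      exact ⟨hnb, e, he, rfl⟩
    · rintro ⟨hub, e, he, h1⟩
      exact ⟨e, ⟨he, h1 ▸ hub⟩, h1⟩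
  have hperm : ((PySem.List.sorted U (fun x => x) false).filter (fun u =>
      decide (th <
        PySem.Set.len
          (PySem.Set.ofList ((log.filter (fun e => e.2.1 == u)).map (·.2.2)))))).Perm
      (dA.keys.filter (fun u => decide (th < PySem.Set.len (dA.getD u PySem.Set.empty)))) := by
    have hnodU : U.Nodup := PySem.Set.nodup_ofList _
    have hnodS : (PySem.List.sorted U (fun x => x) false).Nodup :=
      (PySem.List.sorted_perm U (fun x => x) false).nodup_iff.mpr hnodU
    rw [List.perm_ext_iff_of_nodup (hnodS.filter _) (hnodA.filter _)]
    intro u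
    simp only [List.mem_filter, PySem.List.mem_sorted, decide_eq_true_eq]
    rw [hmemU u]
    constructor
    · rintro ⟨⟨hub, hex⟩, hc⟩
      refine ⟨?_, ?_⟩
      · rw [hdA, foldA_mem_keys]
        simp [PySem.Dict.keys_empty, hub, hex]
      · rw [hgd u hub]; exact hc
    · rintro ⟨hk, hc⟩
      have hmem : u ∉ bots ∧ ∃ e ∈ log, e.2.1 = u := by
        have := (foldA_mem_keys bots log PySem.Dict.empty u).mp (hdA ▸ hk)
        simpa [PySem.Dict.keys_empty] using this
      refine ⟨hmem, ?_⟩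
      rw [hgd u hmem.1] at hc; exact hc
  exact PySem.List.sorted_eq_of_perm_of_pairwise_lt _ _ _ hperm hpair
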